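-- pv_equiv track=rewrite | github.com/RayHsu1117/Coursera-Python | File Differences/main.py | singleline_diff
-- ===== SOURCE A (Python) =====
-- IDENTICAL = -1
--
-- def singleline_diff(line1, line2):
--     """
--     Inputs:
--       line1 - first single line string
--       line2 - second single line string
--     Output:
--       Returns the index where the first difference between
--       line1 and line2 occurs.
--
--       Returns IDENTICAL if the two lines are the same.
--     """
--     if line1 == line2:
--         return IDENTICAL
--     else:
--         for num in range(0, min(len(line1), len(line2))):
--             if line1[num] != line2[num]:
--                 return num
--         return min(len(line1), len(line2))
-- ===== SOURCE B (Python) =====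
-- IDENTICAL = -1
--
-- def singleline_diff(line1, line2):
--     # Binary search for the length of the longest common prefix using bulk
--     # slice comparisons, instead of a character-by-character scan.
--     lo, hi = 0, min(len(line1), len(line2))
--     while lo < hi:
--         mid = (lo + hi + 1) // 2
--         if line1[:mid] == line2[:mid]:
--             lo = mid
--         else:
--             hi = mid - 1
--     if lo == len(line1) == len(line2):
--         return IDENTICAL
--     return lo
-- ===== Notes on version B (the rewrite author's own statement) =====
-- stated objective: alternative
-- what changed: B finds the longest common prefix by binary search on the prefix length using bulk slice comparisons (line1[:mid] == line2[:mid]), then decides IDENTICAL vs index by a final length test, instead of A's full == scan followed by a per-index character loop.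
import Mathlib
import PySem

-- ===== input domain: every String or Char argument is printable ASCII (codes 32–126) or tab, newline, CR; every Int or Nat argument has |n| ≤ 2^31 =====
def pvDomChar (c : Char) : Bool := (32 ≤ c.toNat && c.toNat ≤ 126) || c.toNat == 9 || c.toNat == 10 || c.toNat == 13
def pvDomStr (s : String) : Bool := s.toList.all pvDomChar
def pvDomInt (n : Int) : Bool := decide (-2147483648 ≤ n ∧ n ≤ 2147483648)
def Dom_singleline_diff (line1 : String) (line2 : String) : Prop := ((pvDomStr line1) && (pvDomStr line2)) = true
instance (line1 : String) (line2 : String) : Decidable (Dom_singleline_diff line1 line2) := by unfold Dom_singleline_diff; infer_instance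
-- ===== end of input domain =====

-- B replaces A's full equality scan + per-index character loop by a binary
-- search on the common-prefix length via bulk slice comparisons (alternative
-- decomposition, not claimed faster). Return values agree on all inputs.

-- ===== PORT A =====
-- for num in range(0, min(len(line1), len(line2))): if line1[num] != line2[num]: return num
-- ports as structural recursion over the range list; indices are always in range, so getD is exact
def pvALoop (l1 l2 : List Char) : List Nat → Int
  | [] => ((min l1.length l2.length : Nat) : Int)
  | n :: rest => if l1.getD n ' ' ≠ l2.getD n ' ' then (n : Int) else pvALoop l1 l2 rest

def singleline_diff (line1 : String) (line2 : String) : Int :=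
  if line1.toList = line2.toList then -1
  else pvALoop line1.toList line2.toList (List.range (min line1.toList.length line2.toList.length))

-- ===== PORT B =====
-- while lo < hi: mid = (lo+hi+1)//2; if line1[:mid] == line2[:mid]: lo = mid else: hi = mid-1
-- lo, hi are nonnegative throughout, so Nat lo/hi and List.take mid are exact
-- ports of Python's ints and the slice s[:mid].
def pvBSearch (a b : List Char) (lo hi : Nat) : Nat :=
  if lo < hi then
    let mid := (lo + hi + 1) / 2
    if a.take mid = b.take mid then pvBSearch a b mid hi
    else pvBSearch a b lo (mid - 1)
  else lo
termination_by hi - lo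
decreasing_by all_goals omega

def singleline_diff_alt (line1 : String) (line2 : String) : Int :=
  let a := line1.toList
  let b := line2.toList
  let lo := pvBSearch a b 0 (min a.length b.length)
  if lo = a.length ∧ a.length = b.length then -1 else (lo : Int)

-- ===== PRECONDITION & SPEC =====
def Spec_singleline_diff (line1 : String) (line2 : String) (out : Int) : Prop := out = singleline_diff_alt line1 line2
instance (line1 : String) (line2 : String) (out : Int) : Decidable (Spec_singleline_diff line1 line2 out) := by unfold Spec_singleline_diff; infer_instance

-- ===== CLAIM (what is proved, stated in full; the proofs are below) =====
def Claim_equal_singleline_diff : Prop := ∀ (line1 : String) (line2 : String), Dom_singleline_diff line1 line2 → Spec_singleline_diff line1 line2 (singleline_diff line1 line2)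

-- ===== LEMMAS AND PROOFS =====

-- longest-common-prefix length: the value both programs compute around
def pvLcp : List Char → List Char → Nat
  | c :: x, d :: y => if c = d then pvLcp x y + 1 else 0
  | _, _ => 0

theorem pvLcp_le_min (a b : List Char) : pvLcp a b ≤ min a.length b.length := by
  induction a generalizing b with
  | nil => cases b <;> simp [pvLcp]
  | cons c x ih =>
    cases b with
    | nil => simp [pvLcp]
    | cons d y =>
      by_cases h : c = d
      · simpa [pvLcp, h, Nat.succ_min_succ] using ih y
      · simp [pvLcp, h]

theorem pvTake_eq_iff (a b : List Char) (m : Nat) (hm : m ≤ min a.length b.length) :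
    a.take m = b.take m ↔ m ≤ pvLcp a b := by
  induction a generalizing b m with
  | nil =>
    cases b <;> simp_all
  | cons c x ih =>
    cases b with
    | nil => simp at hm; simp [hm, pvLcp]
    | cons d y =>
      cases m with
      | zero => simp
      | succ m =>
        by_cases h : c = d
        · subst h
          have hm' : m ≤ min x.length y.length := by
            simp [Nat.succ_min_succ] at hm; omega
          simp only [List.take_succ_cons, List.cons_eq_cons, true_and]
          rw [ih y m hm']
          simp [pvLcp]
        · simp [pvLcp, h]

theorem pvLcp_self (a : List Char) : pvLcp a a = a.length := by
  induction a with
  | nil => rfl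
  | cons c x ih => simp [pvLcp, ih]

theorem pvLcp_full_eq (a b : List Char) (h1 : pvLcp a b = a.length) (h2 : a.length = b.length) :
    a = b := by
  have hm : a.length ≤ min a.length b.length := by omega
  have h3 := (pvTake_eq_iff a b a.length hm).2 (le_of_eq h1.symm)
  rw [List.take_length, h2, List.take_length] at h3
  exact h3

theorem pvBSearch_eq (a b : List Char) (lo hi : Nat) (h1 : lo ≤ hi)
    (h2 : hi ≤ min a.length b.length) (h3 : a.take lo = b.take lo)
    (h4 : pvLcp a b ≤ hi) :
    pvBSearch a b lo hi = pvLcp a b := by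
  induction lo, hi using pvBSearch.induct a b with
  | case1 lo hi hlt mid htake ih =>
    rw [pvBSearch, if_pos hlt, if_pos htake]
    exact ih (by omega) h2 htake h4
  | case2 lo hi hlt mid htake ih =>
    rw [pvBSearch, if_pos hlt, if_neg htake]
    have hlc : pvLcp a b ≤ mid - 1 := by
      have : ¬ mid ≤ pvLcp a b := fun h =>
        htake ((pvTake_eq_iff a b mid (by omega)).2 h)
      omega
    have hlo : lo ≤ pvLcp a b := (pvTake_eq_iff a b lo (by omega)).1 h3
    exact ih (by omega) (by omega) h3 hlc
  | case3 lo hi hlt =>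
    rw [pvBSearch, if_neg hlt]
    have hlo : lo ≤ pvLcp a b := (pvTake_eq_iff a b lo (by omega)).1 h3
    omega

-- first-mismatch index, a characterisation of A's loop
def pvFM : List Char → List Char → Option Nat
  | [], _ => none
  | _, [] => none
  | c :: x, d :: y => if c ≠ d then some 0 else (pvFM x y).map (· + 1)

theorem pvFM_self (a : List Char) : pvFM a a = none := by
  induction a with
  | nil => simp [pvFM]
  | cons c x ih => simp [pvFM, ih]

theorem pvFM_none_eq (a b : List Char) (h : pvFM a b = none)
    (hl : a.length = b.length) : a = b := by
  induction a generalizing b with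
  | nil => cases b with | nil => rfl | cons d y => simp at hl
  | cons c x ih =>
    cases b with
    | nil => simp at hl
    | cons d y =>
      by_cases hc : c = d
      · subst hc
        simp [pvFM] at h
        simp at hl
        exact congrArg (c :: ·) (ih y h hl)
      · simp [pvFM, hc] at h

theorem pvLcp_eq_fm (a b : List Char) :
    pvLcp a b = match pvFM a b with
                | some n => n
                | none => min a.length b.length := by
  induction a generalizing b with
  | nil => cases b <;> simp [pvLcp, pvFM]
  | cons c x ih =>
    cases b with
    | nil => simp [pvLcp, pvFM]
    | cons d y =>
      by_cases h : c = d
      · subst h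
        simp only [pvLcp, pvFM, ne_eq, not_true_eq_false, if_false]
        rw [ih y]
        cases pvFM x y <;> simp [Nat.succ_min_succ]
      · simp [pvLcp, pvFM, h]

theorem pvALoop_shift (x y : List Char) (c d : Char) (l : List Nat) :
    pvALoop (c :: x) (d :: y) (l.map Nat.succ) = pvALoop x y l + 1 := by
  induction l with
  | nil => simp [pvALoop, Nat.succ_min_succ]
  | cons n rest ih =>
    simp only [pvALoop, List.map_cons, List.getD_cons_succ]
    split_ifs with h
    · push_cast; ring
    · exact ih

theorem pvAMain (a b : List Char) :
    (if a = b then (-1 : Int)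
     else pvALoop a b (List.range (min a.length b.length)))
    = (match pvFM a b with
       | some n => (n : Int)
       | none => if a.length = b.length then -1
                 else ((min a.length b.length : Nat) : Int)) := by
  induction a generalizing b with
  | nil =>
    cases b with
    | nil => simp [pvFM]
    | cons d y => simp [pvALoop, pvFM, List.range_zero]
  | cons c x ih =>
    cases b with
    | nil => simp [pvALoop, pvFM, List.range_zero]
    | cons d y =>
      by_cases hc : c = d
      · subst hc
        have hrange : List.range (min (c :: x).length (c :: y).length)
            = 0 :: (List.range (min x.length y.length)).map Nat.succ := by
          simp [List.length_cons, Nat.succ_min_succ, List.range_succ_eq_map]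
        rw [hrange]
        have h0 : pvALoop (c :: x) (c :: y) (0 :: (List.range (min x.length y.length)).map Nat.succ)
            = pvALoop x y (List.range (min x.length y.length)) + 1 := by
          rw [pvALoop]
          simp [pvALoop_shift]
        rw [h0]
        have hfmc : pvFM (c :: x) (c :: y) = (pvFM x y).map (· + 1) := by
          simp [pvFM]
        rw [hfmc]
        have hih := ih y
        by_cases hxy : x = y
        · subst hxy
          simp [pvFM_self]
        · rw [if_neg (show ¬ (c :: x) = (c :: y) by simp [hxy])]
          rw [if_neg hxy] at hih
          cases hfm : pvFM x y with
          | some n =>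
            rw [hfm] at hih
            rw [hih]
            simp
          | none =>
            rw [hfm] at hih
            have hlen : x.length ≠ y.length := fun hl => hxy (pvFM_none_eq x y hfm hl)
            rw [if_neg hlen] at hih
            rw [hih]
            simp [hlen, Nat.succ_min_succ]
      · have hcons : (c :: x) ≠ (d :: y) := by simp [hc]
        rw [if_neg hcons]
        have hrange : List.range (min (c :: x).length (d :: y).length)
            = 0 :: (List.range (min x.length y.length)).map Nat.succ := by
          simp [List.length_cons, Nat.succ_min_succ, List.range_succ_eq_map]
        rw [hrange, pvALoop]
        simp [pvFM, hc]

-- ===== VERDICT (by name: the statement is the Claim_ definition above) =====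
theorem singleline_diff_spec : Claim_equal_singleline_diff := by
  intro line1 line2 _
  unfold Spec_singleline_diff singleline_diff singleline_diff_alt
  set a := line1.toList
  set b := line2.toList
  have hbs : pvBSearch a b 0 (min a.length b.length) = pvLcp a b :=
    pvBSearch_eq a b 0 (min a.length b.length) (Nat.zero_le _) le_rfl (by simp)
      (pvLcp_le_min a b)
  simp only [hbs]
  have hA := pvAMain a b
  by_cases hab : a = b
  · rw [if_pos hab, if_pos ⟨by rw [hab, pvLcp_self], by rw [hab]⟩]
  · have hnot : ¬ (pvLcp a b = a.length ∧ a.length = b.length) := by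
      rintro ⟨h1, h2⟩; exact hab (pvLcp_full_eq a b h1 h2)
    rw [if_neg hab] at hA
    rw [if_neg hnot, if_neg hab, hA, pvLcp_eq_fm]
    cases hfm : pvFM a b with
    | some n => simp
    | none =>
      have hlen : a.length ≠ b.length := fun hl => hab (pvFM_none_eq a b hfm hl)
      simp [hlen]
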